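-- pv_equiv track=rewrite | github.com/arb8020/research | rollouts/tools/refactor-artillery/refactor.py | extract_task_from_file
-- ===== SOURCE A (Python) =====
-- def extract_task_from_file(content: str) -> tuple[str, str]:
--     """
--     Extract task from trailing comments in file.
--     Returns (body_without_task, task_text).
--     """
--     lines = content.rstrip().split("\n")
--
--     # Find trailing comment block
--     task_lines = []
--     idx = len(lines) - 1
--
--     while idx >= 0:
--         line = lines[idx]
--         stripped = line.strip()
--
--         # Check if line is a comment
--         is_comment = False
--         comment_text = ""
--
--         for prefix in ("#", "//", "--"):
--             if stripped.startswith(prefix):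
--                 is_comment = True
--                 comment_text = stripped[len(prefix) :].strip()
--                 break
--
--         if is_comment:
--             task_lines.append(comment_text)
--             idx -= 1
--         elif stripped == "":
--             # Skip trailing blank lines
--             idx -= 1
--         else:
--             break
--
--     if not task_lines:
--         raise ValueError("File must end with a comment block describing the task")
--
--     task = "\n".join(reversed(task_lines))
--     body = "\n".join(lines[: idx + 1])
--
--     return body, task
-- ===== SOURCE B (Python) =====
-- def extract_task_from_file(content: str) -> tuple[str, str]:
--     """
--     Extract task from trailing comments in file.
--     Returns (body_without_task, task_text).
--     Forward single pass: track the index of the last non-comment, non-blank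
--     line; everything after it is the trailing comment block.
--     """
--     lines = content.rstrip().split("\n")
--
--     def comment_text(stripped):
--         for prefix in ("#", "//", "--"):
--             if stripped.startswith(prefix):
--                 return stripped[len(prefix):].strip()
--         return None
--
--     split = -1
--     for i, line in enumerate(lines):
--         s = line.strip()
--         if s != "" and comment_text(s) is None:
--             split = i
--
--     task_lines = []
--     for line in lines[split + 1:]:
--         s = line.strip()
--         if s != "":
--             task_lines.append(comment_text(s))
--
--     if not task_lines:
--         raise ValueError("File must end with a comment block describing the task")
--
--     return "\n".join(lines[:split + 1]), "\n".join(task_lines)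
-- ===== Notes on version B (the rewrite author's own statement) =====
-- stated objective: alternative
-- what changed: B replaces A's backward while-loop with early break by a forward single pass that records the index of the last non-comment non-blank line, then slices body and comment block from it (no reversal needed).
import Mathlib
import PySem

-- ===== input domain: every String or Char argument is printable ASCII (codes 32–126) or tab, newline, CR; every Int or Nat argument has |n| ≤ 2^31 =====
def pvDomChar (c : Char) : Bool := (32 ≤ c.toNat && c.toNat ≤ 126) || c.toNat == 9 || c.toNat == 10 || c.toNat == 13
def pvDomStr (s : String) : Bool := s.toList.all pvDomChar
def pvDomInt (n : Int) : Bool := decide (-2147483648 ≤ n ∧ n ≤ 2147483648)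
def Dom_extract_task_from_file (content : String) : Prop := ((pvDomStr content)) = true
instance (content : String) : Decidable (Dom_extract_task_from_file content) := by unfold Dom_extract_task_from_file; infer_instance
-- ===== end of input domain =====

-- B rewrites A's backward comment-block scan as a forward single pass (alternative decomposition, same cost); equivalence is on return values, inputs where both raise ValueError are outside Pre_.

-- ===== PORT A =====
-- the inner 'for prefix in ("#", "//", "--")' loop: (is_comment, comment_text)
def pvCommentCheckA (stripped : String) : Bool × String :=
  if PySem.Str.startswith stripped "#" then
    (true, PySem.Str.strip (PySem.Str.slice stripped (some 1) none))
  else if PySem.Str.startswith stripped "//" then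
    (true, PySem.Str.strip (PySem.Str.slice stripped (some 2) none))
  else if PySem.Str.startswith stripped "--" then
    (true, PySem.Str.strip (PySem.Str.slice stripped (some 2) none))
  else (false, "")

-- the 'while idx >= 0' loop; fuel = idx + 1, returns (task_lines, idx + 1 at break)
def pvALoop (lines : List String) : Nat → List String → List String × Nat
  | 0, task_lines => (task_lines, 0)
  | n + 1, task_lines =>
    let line := lines.getD n ""
    let stripped := PySem.Str.strip line
    let c := pvCommentCheckA stripped
    if c.1 then pvALoop lines n (task_lines ++ [c.2])
    else if stripped == "" then pvALoop lines n task_lines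
    else (task_lines, n + 1)

def extract_task_from_file (content : String) : String × String :=
  let lines := (PySem.Str.split? (PySem.Str.rstrip content) "\n").getD []
  let r := pvALoop lines lines.length []
  -- 'if not task_lines: raise ValueError' — excluded by Pre_
  let task := PySem.Str.join "\n" r.1.reverse
  let body := PySem.Str.join "\n" (PySem.List.slice lines none (some ((r.2 : Int))))
  (body, task)

-- ===== PORT B =====
def pvCommentTextB (stripped : String) : Option String :=
  if PySem.Str.startswith stripped "#" then
    some (PySem.Str.strip (PySem.Str.slice stripped (some 1) none))
  else if PySem.Str.startswith stripped "//" then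
    some (PySem.Str.strip (PySem.Str.slice stripped (some 2) none))
  else if PySem.Str.startswith stripped "--" then
    some (PySem.Str.strip (PySem.Str.slice stripped (some 2) none))
  else none

def extract_task_from_file_alt (content : String) : String × String :=
  let lines := (PySem.Str.split? (PySem.Str.rstrip content) "\n").getD []
  let split : Int := (PySem.List.enumerate lines 0).foldl
    (fun acc p =>
      let s := PySem.Str.strip p.2
      if s ≠ "" ∧ (pvCommentTextB s).isNone then p.1 else acc) (-1)
  let task_lines := (PySem.List.slice lines (some (split + 1)) none).foldl
    (fun acc line =>
      let s := PySem.Str.strip line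
      -- in Source B the appended value is comment_text(s), guaranteed non-None here; .getD "" is the unreachable-None default
      if s ≠ "" then acc ++ [(pvCommentTextB s).getD ""] else acc) []
  -- 'if not task_lines: raise ValueError' — excluded by Pre_
  (PySem.Str.join "\n" (PySem.List.slice lines none (some (split + 1))),
   PySem.Str.join "\n" task_lines)

-- ===== PRECONDITION & SPEC =====
-- Pre_ excludes exactly the inputs where A (and B) raise ValueError: content whose
-- last non-whitespace-trailing line is not a comment, or all-whitespace content.
def Pre_extract_task_from_file (content : String) : Prop :=
  PySem.Str.rstrip content ≠ "" ∧
  (let lines := (PySem.Str.split? (PySem.Str.rstrip content) "\n").getD []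
   let last := PySem.Str.strip (lines.getLast?.getD "")
   PySem.Str.startswith last "#" = true ∨ PySem.Str.startswith last "//" = true ∨
     PySem.Str.startswith last "--" = true)
instance (content : String) : Decidable (Pre_extract_task_from_file content) := by
  unfold Pre_extract_task_from_file; infer_instance

def pvWitness_extract_task_from_file : String := "x = 1\n# add two\n// more"

def Spec_extract_task_from_file (content : String) (out : String × String) : Prop := out = extract_task_from_file_alt content
instance (content : String) (out : String × String) : Decidable (Spec_extract_task_from_file content out) := by unfold Spec_extract_task_from_file; infer_instance

-- ===== CLAIM (what is proved, stated in full; the proofs are below) =====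
def Claim_equal_extract_task_from_file : Prop := ∀ (content : String), Dom_extract_task_from_file content → Pre_extract_task_from_file content → Spec_extract_task_from_file content (extract_task_from_file content)

-- ===== LEMMAS AND PROOFS =====

-- the B-side fold computing 'split' on a given line list
def pvSplitIdx (lines : List String) : Int :=
  (PySem.List.enumerate lines 0).foldl
    (fun acc p =>
      let s := PySem.Str.strip p.2
      if s ≠ "" ∧ (pvCommentTextB s).isNone then p.1 else acc) (-1)

-- the B-side fold collecting task_lines from a suffix
def pvTaskB (suffix : List String) : List String :=
  suffix.foldl
    (fun acc line =>
      let s := PySem.Str.strip line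
      if s ≠ "" then acc ++ [(pvCommentTextB s).getD ""] else acc) []

theorem commentCheck_eq (s : String) :
    pvCommentCheckA s = (((pvCommentTextB s).isSome : Bool), (pvCommentTextB s).getD "") := by
  unfold pvCommentCheckA pvCommentTextB
  split_ifs <;> rfl

theorem pvALoop_acc (lines : List String) (n : Nat) (acc : List String) :
    pvALoop lines n acc = (acc ++ (pvALoop lines n []).1, (pvALoop lines n []).2) := by
  induction n generalizing acc with
  | zero => simp [pvALoop]
  | succ n ih =>
    simp only [pvALoop]
    split_ifs with h1 h2
    · conv_rhs => rw [ih]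
      rw [ih]; simp
    · exact ih acc
    · simp

theorem pvALoop_prefix (ls : List String) (x : String) (n : Nat) (hn : n ≤ ls.length)
    (acc : List String) : pvALoop (ls ++ [x]) n acc = pvALoop ls n acc := by
  induction n generalizing acc with
  | zero => rfl
  | succ n ih =>
    have hget : (ls ++ [x]).getD n "" = ls.getD n "" := by
      simp [List.getD, List.getElem?_append_left (by omega : n < ls.length)]
    simp only [pvALoop, hget]
    split_ifs <;> first | exact ih (by omega) _ | rfl

theorem pvSplitIdx_append (ls : List String) (x : String) :
    pvSplitIdx (ls ++ [x]) =
      (if PySem.Str.strip x ≠ "" ∧ (pvCommentTextB (PySem.Str.strip x)).isNone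
        then (ls.length : Int) else pvSplitIdx ls) := by
  unfold pvSplitIdx
  rw [PySem.List.enumerate_append]
  simp [List.foldl_append, PySem.List.enumerate_cons, PySem.List.enumerate_nil]

theorem pvSplitIdx_bounds (lines : List String) :
    -1 ≤ pvSplitIdx lines ∧ pvSplitIdx lines < lines.length := by
  induction lines using List.reverseRecOn with
  | nil => simp [pvSplitIdx, PySem.List.enumerate]
  | append_singleton ls x ih =>
    rw [pvSplitIdx_append]
    simp only [List.length_append, List.length_cons, List.length_nil]
    split_ifs
    · constructor
      · omega
      · push_cast; omega
    · push_cast; omega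

-- the central invariant: A's backward loop over the whole list equals B's data
theorem main_loop_eq (lines : List String) :
    pvALoop lines lines.length [] =
      ((pvTaskB (PySem.List.slice lines (some (pvSplitIdx lines + 1)) none)).reverse,
       (pvSplitIdx lines + 1).toNat) := by
  induction lines using List.reverseRecOn with
  | nil => simp [pvALoop, pvTaskB, pvSplitIdx, PySem.List.enumerate, PySem.List.slice]
  | append_singleton ls x ih =>
    have hb := pvSplitIdx_bounds ls
    have hslice : ∀ (l : List String) (k : Int), 0 ≤ k →
        PySem.List.slice l (some k) none = l.drop k.toNat := fun l k hk =>
      PySem.List.slice_from l hk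
    rw [pvSplitIdx_append]
    simp only [List.length_append, List.length_cons, List.length_nil]
    by_cases hcode : PySem.Str.strip x ≠ "" ∧ (pvCommentTextB (PySem.Str.strip x)).isNone
    · -- x is a code line: A breaks immediately; B's split is ls.length
      rw [if_pos hcode]
      have : ls.length + 1 = ls.length + 1 := rfl
      show pvALoop (ls ++ [x]) (ls.length + 1) [] = _
      simp only [pvALoop]
      have hget : (ls ++ [x]).getD ls.length "" = x := by
        simp [List.getD]
      rw [hget]
      rw [commentCheck_eq]
      rcases hcode with ⟨hne, hnone⟩
      rw [Option.isNone_iff_eq_none] at hnone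
      simp only [hnone]
      rw [if_neg (by simp)]
      rw [if_neg (by simpa using hne)]
      have h1 : ((ls.length : Int) + 1).toNat = ls.length + 1 := by omega
      rw [hslice _ _ (by omega)]
      have : ((ls.length : Int) + 1).toNat = ls.length + 1 := by omega
      rw [this]
      rw [List.drop_eq_nil_of_le (by simp)]
      simp [pvTaskB]
    · rw [if_neg hcode]
      show pvALoop (ls ++ [x]) (ls.length + 1) [] = _
      simp only [pvALoop]
      have hget : (ls ++ [x]).getD ls.length "" = x := by simp [List.getD]
      rw [hget, commentCheck_eq]
      have hk : (pvSplitIdx ls + 1).toNat ≤ ls.length := by omega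
      have hdropapp : (ls ++ [x]).drop (pvSplitIdx ls + 1).toNat
          = ls.drop (pvSplitIdx ls + 1).toNat ++ [x] :=
        List.drop_append_of_le_length hk
      by_cases hcom : (pvCommentTextB (PySem.Str.strip x)).isSome
      · -- x is a comment line
        rw [if_pos (by simpa using hcom)]
        rw [pvALoop_prefix ls x _ le_rfl, pvALoop_acc]
        rw [ih]
        rw [hslice _ _ (by omega), hslice _ _ (by omega), hdropapp]
        unfold pvTaskB
        rw [List.foldl_append]
        simp only [List.foldl_cons, List.foldl_nil]
        have hne : PySem.Str.strip x ≠ "" := by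
          intro h
          rw [h] at hcom
          simp [pvCommentTextB, PySem.Str.startswith] at hcom
          revert hcom; decide
        rw [if_pos hne]
        simp
      · -- x is blank: strip x = "" (non-code, non-comment)
        have hblank : PySem.Str.strip x = "" := by
          by_contra hne
          exact hcode ⟨hne, by simpa using hcom⟩
        rw [if_neg (by simp [hcom]), if_pos (by simp [hblank])]
        rw [pvALoop_prefix ls x _ le_rfl, ih]
        rw [hslice _ _ (by omega), hslice _ _ (by omega), hdropapp]
        unfold pvTaskB
        rw [List.foldl_append]
        simp [hblank]

-- ===== VERDICT (by name: the statement is the Claim_ definition above) =====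
theorem extract_task_from_file_spec : Claim_equal_extract_task_from_file := by
  intro content _ _
  unfold Spec_extract_task_from_file extract_task_from_file extract_task_from_file_alt
  simp only []
  set lines := (PySem.Str.split? (PySem.Str.rstrip content) "\n").getD [] with hl
  have h := main_loop_eq lines
  have hb := pvSplitIdx_bounds lines
  have hsplit : ((PySem.List.enumerate lines 0).foldl
      (fun acc p =>
        let s := PySem.Str.strip p.2
        if s ≠ "" ∧ (pvCommentTextB s).isNone then p.1 else acc) (-1)) =
      pvSplitIdx lines := rfl
  rw [hsplit, h]
  have hcast : (((pvSplitIdx lines + 1).toNat : Int)) = pvSplitIdx lines + 1 := by omega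
  rw [hcast]
  have htask : ∀ suf : List String,
      (suf.foldl (fun acc line =>
        let s := PySem.Str.strip line
        if s ≠ "" then acc ++ [(pvCommentTextB s).getD ""] else acc) []) = pvTaskB suf :=
    fun _ => rfl
  rw [htask, List.reverse_reverse]
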